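-- pv_equiv track=rewrite | github.com/Tomas-W/ProjectView | ProjectView/utilities/app_window_utils.py | get_current_project_settings
-- ===== SOURCE A (Python) =====
-- def get_current_project_settings(application_buttons, directory_buttons,
--                                  website_buttons):
--     """
--     Gets project user widget information from buttons lists and returns it as a dictionary.
--     Called by save_project() or rename_project().
--
--     :param application_buttons: List of user application buttons info (list str class).
--     :param directory_buttons: List of user directory buttons info (list str class).
--     :param website_buttons: List of user website buttons info (list str class).
--
--     :return: Dictionary with settings names as keys and
--         a list of settings as values (dict list).
--     """
--     # Buttons are added in pairs for easy delete, so must alternate here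
--     return {
--             "application_names": [x[0] for i, x in enumerate(application_buttons) if i % 2 == 0],
--             "application_targets": [x[1] for i, x in enumerate(application_buttons) if i % 2 == 0],
--             "directory_names": [x[0] for i, x in enumerate(directory_buttons) if i % 2 == 0],
--             "directory_targets": [x[1] for i, x in enumerate(directory_buttons) if i % 2 == 0],
--             "website_names": [x[0] for i, x in enumerate(website_buttons) if i % 2 == 0],
--             "website_targets": [x[1] for i, x in enumerate(website_buttons) if i % 2 == 0]
--         }
-- ===== SOURCE B (Python) =====
-- def get_current_project_settings(application_buttons, directory_buttons,
--                                  website_buttons):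
--     """Single-pass variant: one while-loop per list steps over even indices
--     and collects name and target together, instead of six enumerate-filter
--     comprehensions (two passes per list)."""
--     def extract(buttons):
--         names, targets = [], []
--         i, n = 0, len(buttons)
--         while i < n:
--             b = buttons[i]
--             names.append(b[0])
--             targets.append(b[1])
--             i += 2
--         return names, targets
--
--     an, at = extract(application_buttons)
--     dn, dt = extract(directory_buttons)
--     wn, wt = extract(website_buttons)
--     return {
--         "application_names": an,
--         "application_targets": at,
--         "directory_names": dn,
--         "directory_targets": dt,
--         "website_names": wn,
--         "website_targets": wt,
--     }
-- ===== Notes on version B (the rewrite author's own statement) =====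
-- stated objective: simpler
-- what changed: Replaces six independent enumerate-and-filter comprehensions (two full passes per list) with one shared helper that walks each list once by index step 2, collecting names and targets together.
import Mathlib
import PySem

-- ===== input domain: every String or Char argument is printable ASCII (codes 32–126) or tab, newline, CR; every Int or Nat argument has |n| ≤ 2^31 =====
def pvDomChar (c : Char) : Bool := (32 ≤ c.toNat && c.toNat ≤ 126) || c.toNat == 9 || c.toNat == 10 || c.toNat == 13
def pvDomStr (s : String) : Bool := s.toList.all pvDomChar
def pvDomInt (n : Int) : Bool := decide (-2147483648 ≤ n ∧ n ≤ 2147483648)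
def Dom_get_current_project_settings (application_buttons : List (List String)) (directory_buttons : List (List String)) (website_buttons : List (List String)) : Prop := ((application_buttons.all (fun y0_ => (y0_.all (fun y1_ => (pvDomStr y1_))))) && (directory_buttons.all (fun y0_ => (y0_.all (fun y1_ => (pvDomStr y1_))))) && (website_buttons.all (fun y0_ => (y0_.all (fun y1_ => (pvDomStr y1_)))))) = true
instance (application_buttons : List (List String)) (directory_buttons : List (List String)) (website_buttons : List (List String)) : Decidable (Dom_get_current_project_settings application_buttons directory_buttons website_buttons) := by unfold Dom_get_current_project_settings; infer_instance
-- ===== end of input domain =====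

-- B replaces A's six independent enumerate-and-filter comprehensions with one shared
-- helper that walks each list once by index step 2 (simpler decomposition, same cost class).


-- ===== PORT A =====
-- x[j] for the (possibly too short) button entry; Pre_ guarantees the index is in range,
-- so the .getD "" default is never the value inside the claimed domain.
def pvItem (x : List String) (j : Int) : String := (PySem.List.pyGet? x j).getD ""

-- one of A's comprehensions: [x[j] for i, x in enumerate(buttons) if i % 2 == 0]
def pvCompA (buttons : List (List String)) (j : Int) : List String :=
  ((PySem.List.enumerate buttons 0).filter (fun p => PySem.Int.mod p.1 2 == 0)).map
    (fun p => pvItem p.2 j)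

def get_current_project_settings (application_buttons : List (List String)) (directory_buttons : List (List String)) (website_buttons : List (List String)) : List (String × List String) :=
  [("application_names", pvCompA application_buttons 0),
   ("application_targets", pvCompA application_buttons 1),
   ("directory_names", pvCompA directory_buttons 0),
   ("directory_targets", pvCompA directory_buttons 1),
   ("website_names", pvCompA website_buttons 0),
   ("website_targets", pvCompA website_buttons 1)]

-- ===== PORT B =====
-- B's while-loop: i walks 0, 2, 4, …; names and targets are appended in the same pass.
def pvExtractLoop (buttons : List (List String)) (n : Nat) (i : Nat)
    (names targets : List String) : List String × List String :=
  if _h : i < n then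
    let b := (PySem.List.pyGet? buttons (i : Int)).getD []
    pvExtractLoop buttons n (i + 2) (names ++ [pvItem b 0]) (targets ++ [pvItem b 1])
  else (names, targets)
termination_by n - i

def pvExtract (buttons : List (List String)) : List String × List String :=
  pvExtractLoop buttons buttons.length 0 [] []

def get_current_project_settings_alt (application_buttons : List (List String)) (directory_buttons : List (List String)) (website_buttons : List (List String)) : List (String × List String) :=
  let a := pvExtract application_buttons
  let d := pvExtract directory_buttons
  let w := pvExtract website_buttons
  [("application_names", a.1), ("application_targets", a.2),
   ("directory_names", d.1), ("directory_targets", d.2),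
   ("website_names", w.1), ("website_targets", w.2)]

-- ===== PRECONDITION & SPEC =====
-- Pre_ excludes exactly the inputs where the Python A raises IndexError:
-- an even-indexed button entry with fewer than 2 fields.
def Pre_get_current_project_settings (application_buttons : List (List String)) (directory_buttons : List (List String)) (website_buttons : List (List String)) : Prop :=
  (∀ k, (h : k < application_buttons.length) → k % 2 = 0 → 2 ≤ (application_buttons[k]'h).length) ∧
  (∀ k, (h : k < directory_buttons.length) → k % 2 = 0 → 2 ≤ (directory_buttons[k]'h).length) ∧
  (∀ k, (h : k < website_buttons.length) → k % 2 = 0 → 2 ≤ (website_buttons[k]'h).length)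
instance (application_buttons : List (List String)) (directory_buttons : List (List String)) (website_buttons : List (List String)) : Decidable (Pre_get_current_project_settings application_buttons directory_buttons website_buttons) := by unfold Pre_get_current_project_settings; infer_instance

def pvWitness_get_current_project_settings : List (List String) × List (List String) × List (List String) :=
  ([["app", "C:\\app.exe"], ["x"]], [["dir", "/home"]], [])

def Spec_get_current_project_settings (application_buttons : List (List String)) (directory_buttons : List (List String)) (website_buttons : List (List String)) (out : List (String × List String)) : Prop := out = get_current_project_settings_alt application_buttons directory_buttons website_buttons
instance (application_buttons : List (List String)) (directory_buttons : List (List String)) (website_buttons : List (List String)) (out : List (String × List String)) : Decidable (Spec_get_current_project_settings application_buttons directory_buttons website_buttons out) := by unfold Spec_get_current_project_settings; infer_instance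

-- ===== CLAIM (what is proved, stated in full; the proofs are below) =====
def Claim_equal_get_current_project_settings : Prop := ∀ (application_buttons : List (List String)) (directory_buttons : List (List String)) (website_buttons : List (List String)), Dom_get_current_project_settings application_buttons directory_buttons website_buttons → Pre_get_current_project_settings application_buttons directory_buttons website_buttons → Spec_get_current_project_settings application_buttons directory_buttons website_buttons (get_current_project_settings application_buttons directory_buttons website_buttons)

-- ===== LEMMAS AND PROOFS =====

-- proof-side "every other element" list, the common value of both sides
def pvEvens : List (List String) → List (List String)
  | [] => []
  | [x] => [x]
  | x :: _ :: r => x :: pvEvens r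

theorem pvEvens_cons (x : List String) (xs : List (List String)) :
    pvEvens (x :: xs) = x :: pvEvens (xs.drop 1) := by
  cases xs <;> simp [pvEvens]

-- A side: the even-index filter over enumerate picks exactly pvEvens, for any even start
theorem pvCompA_aux (buttons : List (List String)) (j : Int) :
    ∀ s : Int, PySem.Int.mod s 2 = 0 →
      ((PySem.List.enumerate buttons s).filter (fun p => PySem.Int.mod p.1 2 == 0)).map
        (fun p => pvItem p.2 j) = (pvEvens buttons).map (fun x => pvItem x j) := by
  induction buttons using pvEvens.induct with
  | case1 =>
      intro s _
      simp [PySem.List.enumerate, pvEvens]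
  | case2 x =>
      intro s hs
      have hsE : s % 2 = 0 := by
        rw [← PySem.Int.mod_eq_emod_of_pos (by decide : (0:Int) < 2)]; exact hs
      simp [PySem.List.enumerate, List.filter, hsE, pvEvens]
  | case3 x y r ih =>
      intro s hs
      have h2 : (0:Int) < 2 := by decide
      have hsE : s % 2 = 0 := by rw [← PySem.Int.mod_eq_emod_of_pos h2]; exact hs
      have hs2 : PySem.Int.mod (s + 1 + 1) 2 = 0 := by
        rw [PySem.Int.mod_eq_emod_of_pos h2]; omega
      have hb0 : (s % 2 == 0) = true := by simp [hsE]
      have hb1 : ((s + 1) % 2 == 0) = false := by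
        simp; omega
      have ih' := ih _ hs2
      simp only [PySem.Int.mod_eq_emod_of_pos h2] at ih' ⊢
      rw [PySem.List.enumerate_cons, PySem.List.enumerate_cons]
      simp only [List.filter, hb0, hb1]
      simp [pvEvens, ih']

theorem pvCompA_eq (buttons : List (List String)) (j : Int) :
    pvCompA buttons j = (pvEvens buttons).map (fun x => pvItem x j) :=
  pvCompA_aux buttons j 0 (by decide)

-- B side: the loop from index i appends the projections of pvEvens (buttons.drop i)
theorem pvExtractLoop_eq (buttons : List (List String)) :
    ∀ i ns ts, pvExtractLoop buttons buttons.length i ns ts =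
      (ns ++ (pvEvens (buttons.drop i)).map (fun x => pvItem x 0),
       ts ++ (pvEvens (buttons.drop i)).map (fun x => pvItem x 1)) := by
  intro i
  induction hk : buttons.length - i using Nat.strong_induction_on generalizing i with
  | _ k ih =>
    intro ns ts
    rw [pvExtractLoop]
    by_cases h : i < buttons.length
    · have hget : PySem.List.pyGet? buttons (i : Int) = some (buttons[i]'h) :=
        PySem.List.pyGet?_ofNat buttons i h
      have hdrop : buttons.drop i = (buttons[i]'h) :: buttons.drop (i + 1) :=
        List.drop_eq_getElem_cons h
      have hd2 : (buttons.drop (i + 1)).drop 1 = buttons.drop (i + 2) := by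
        rw [List.drop_drop]
      have hev : pvEvens (buttons.drop i)
          = (buttons[i]'h) :: pvEvens (buttons.drop (i + 2)) := by
        rw [hdrop, pvEvens_cons, hd2]
      simp only [h, dif_pos, hget, Option.getD_some]
      rw [ih (buttons.length - (i + 2)) (by omega) (i + 2) rfl _ _, hev]
      simp
    · have : buttons.drop i = [] := List.drop_eq_nil_of_le (by omega)
      simp [h, this, pvEvens]

theorem pvExtract_eq (buttons : List (List String)) :
    pvExtract buttons = ((pvEvens buttons).map (fun x => pvItem x 0),
                         (pvEvens buttons).map (fun x => pvItem x 1)) := by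
  simpa using pvExtractLoop_eq buttons 0 [] []

-- ===== VERDICT (by name: the statement is the Claim_ definition above) =====
theorem get_current_project_settings_spec : Claim_equal_get_current_project_settings := by
  intro a d w _ _
  show _ = _
  simp [get_current_project_settings, get_current_project_settings_alt,
        pvCompA_eq, pvExtract_eq]
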